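-- pv_equiv track=rewrite | github.com/sungkhum/codeclass | lightson/hw3pr1.py | allOnes
-- ===== SOURCE A (Python) =====
-- def allOnes(L):
--     """"Accepts a list and checks if it only contains 1's. If it does
--     it returns true.
--     """
--     #for i in L:
--     #    if L[i] != 1:
--     #        return False
--     #    else:
--     #        return True
--     if L == []:
--         return True
--     else:
--         if L[0] != 1:
--             return False
--         else:
--             return allOnes(L[1:])
-- ===== SOURCE B (Python) =====
-- def allOnes(L):
--     """Accepts a list and checks if it only contains 1's. If it does
--     it returns true.
--     """
--     for x in L:
--         if x != 1:
--             return False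
--     return True
-- ===== Notes on version B (the rewrite author's own statement) =====
-- stated objective: simpler
-- what changed: Replaced recursion over tail slices L[1:] with a single flat iterative scan that returns False on the first non-1 element.
import Mathlib
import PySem

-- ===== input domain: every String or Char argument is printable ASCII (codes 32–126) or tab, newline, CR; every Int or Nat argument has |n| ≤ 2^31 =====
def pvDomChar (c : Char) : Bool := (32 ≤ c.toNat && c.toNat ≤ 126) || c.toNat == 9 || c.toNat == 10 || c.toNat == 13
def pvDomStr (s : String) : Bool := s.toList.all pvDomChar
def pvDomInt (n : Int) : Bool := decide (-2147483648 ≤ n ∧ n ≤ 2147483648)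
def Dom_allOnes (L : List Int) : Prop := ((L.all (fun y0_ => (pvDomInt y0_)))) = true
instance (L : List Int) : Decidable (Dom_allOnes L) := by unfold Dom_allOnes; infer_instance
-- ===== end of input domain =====

-- B replaces A's recursion over tail slices by a flat iterative scan: simpler decomposition.

-- ===== PORT A =====
-- literal transliteration of A's recursion: empty check, head check, recurse on L[1:]
def allOnes (L : List Int) : Bool :=
  if L = [] then true
  else
    match PySem.List.pyGet? L 0 with
    | none => true  -- unreachable: L ≠ []
    | some h => if h ≠ 1 then false else allOnes (PySem.List.slice L (some 1) none)
termination_by L.length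
decreasing_by
  rw [PySem.List.slice_from_one]
  cases L with
  | nil => simp_all
  | cons a t => simp

-- ===== PORT B =====
-- B's for-loop with early return: scan elements, false on first x ≠ 1
def allOnes_alt (L : List Int) : Bool :=
  L.all (fun x => x == 1)

-- ===== PRECONDITION & SPEC =====
def Spec_allOnes (L : List Int) (out : Bool) : Prop := out = allOnes_alt L
instance (L : List Int) (out : Bool) : Decidable (Spec_allOnes L out) := by unfold Spec_allOnes; infer_instance

-- ===== CLAIM (what is proved, stated in full; the proofs are below) =====
def Claim_equal_allOnes : Prop := ∀ (L : List Int), Dom_allOnes L → Spec_allOnes L (allOnes L)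

-- ===== LEMMAS AND PROOFS =====
theorem allOnes_eq_alt (L : List Int) : allOnes L = allOnes_alt L := by
  induction L with
  | nil => simp [allOnes, allOnes_alt]
  | cons a t ih =>
    rw [allOnes]
    simp [PySem.List.pyGet?, PySem.List.pyIdx?, PySem.List.slice_from_one, allOnes_alt] at *
    by_cases h : a = 1 <;> simp [h, ih]

-- ===== VERDICT (by name: the statement is the Claim_ definition above) =====
theorem allOnes_spec : Claim_equal_allOnes := by
  intro L _
  exact allOnes_eq_alt L
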